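-- pv_equiv track=rewrite | github.com/jendamikulik/Resonance-Architects | DREAM_FINAL.py | wiring_neighbors_circulant
-- ===== SOURCE A (Python) =====
-- def wiring_neighbors_circulant(C: int, d: int = 6):
--     nbrs = []
--     for i in range(C):
--         nbr_set = set()
--         for step in range(1, d // 2 + 1):
--             nbr_set.add((i - step) % C)
--             nbr_set.add((i + step) % C)
--         nbrs.append(nbr_set)
--     return nbrs
-- ===== SOURCE B (Python) =====
-- def wiring_neighbors_circulant(C: int, d: int = 6):
--     # Scan/recurrence: build node 0's neighbor list once, then derive every
--     # following row from the PREVIOUS row by a unit rotation (x -> (x+1) % C).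
--     if C <= 0:
--         return []
--     row = []
--     for step in range(1, d // 2 + 1):
--         for o in (-step, step):
--             v = o % C
--             if v not in row:
--                 row.append(v)
--     rows = []
--     for _ in range(C):
--         rows.append(set(row))
--         row = [(x + 1) % C for x in row]
--     return rows
-- ===== Notes on version B (the rewrite author's own statement) =====
-- stated objective: alternative
-- what changed: A recomputes every node's neighbor set independently with a nested per-node step loop; B is a scan: it builds node 0's neighbor list once and then derives each row from the previous row by a unit rotation x -> (x+1) % C, so the +/-step arithmetic runs once instead of C times.
import Mathlib
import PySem

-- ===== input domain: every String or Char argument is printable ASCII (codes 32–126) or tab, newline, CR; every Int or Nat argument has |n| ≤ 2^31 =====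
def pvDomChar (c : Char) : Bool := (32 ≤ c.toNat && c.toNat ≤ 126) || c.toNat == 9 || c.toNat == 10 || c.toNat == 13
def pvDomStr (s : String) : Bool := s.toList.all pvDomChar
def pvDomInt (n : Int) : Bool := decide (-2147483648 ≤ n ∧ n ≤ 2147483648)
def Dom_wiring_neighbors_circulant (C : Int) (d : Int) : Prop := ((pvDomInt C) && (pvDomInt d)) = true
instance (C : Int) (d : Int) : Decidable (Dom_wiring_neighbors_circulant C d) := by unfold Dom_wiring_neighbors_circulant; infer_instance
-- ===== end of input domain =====

-- B replaces A's independent per-node nested step loop by a scan: node 0's row is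
-- built once, and each following row is derived from the previous one by a unit
-- rotation (objective: alternative decomposition, same cost).

-- ===== PORT A =====
def wiring_neighbors_circulant (C : Int) (d : Int) : List (List Int) :=
  (PySem.List.pyRange 0 C 1).foldl
    (fun nbrs i =>
      nbrs ++ [(PySem.List.pyRange 1 (PySem.Int.floordiv d 2 + 1) 1).foldl
        (fun nbr_set step =>
          PySem.Set.add (PySem.Set.add nbr_set (PySem.Int.mod (i - step) C))
            (PySem.Int.mod (i + step) C))
        PySem.Set.empty])
    []

-- ===== PORT B =====
def wiring_neighbors_circulant_alt (C : Int) (d : Int) : List (List Int) :=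
  if C ≤ 0 then []
  else
    let row0 : List Int :=
      (PySem.List.pyRange 1 (PySem.Int.floordiv d 2 + 1) 1).foldl
        (fun row step =>
          [-step, step].foldl (fun row o => PySem.Set.add row (PySem.Int.mod o C)) row)
        []
    ((PySem.List.pyRange 0 C 1).foldl
      (fun (st : List (List Int) × List Int) _ =>
        (st.1 ++ [PySem.Set.ofList st.2], st.2.map (fun x => PySem.Int.mod (x + 1) C)))
      ([], row0)).1

-- ===== PRECONDITION & SPEC =====
def Spec_wiring_neighbors_circulant (C : Int) (d : Int) (out : List (List Int)) : Prop := out = wiring_neighbors_circulant_alt C d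
instance (C : Int) (d : Int) (out : List (List Int)) : Decidable (Spec_wiring_neighbors_circulant C d out) := by unfold Spec_wiring_neighbors_circulant; infer_instance

-- ===== CLAIM =====
def Claim_equal_wiring_neighbors_circulant : Prop := ∀ (C : Int) (d : Int), Dom_wiring_neighbors_circulant C d → Spec_wiring_neighbors_circulant C d (wiring_neighbors_circulant C d)

-- ===== LEMMAS AND PROOFS =====

theorem pv_foldl_app {α β : Type} (g : α → β) (l : List α) :
    ∀ (acc : List β), l.foldl (fun a i => a ++ [g i]) acc = acc ++ l.map g := by
  induction l with
  | nil => simp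
  | cons x xs ih => intro acc; simp [List.foldl_cons, ih]

theorem pv_mod_inj {C b v i : Int} (_hC : 0 < C) (hb : 0 ≤ b ∧ b < C) (hv : 0 ≤ v ∧ v < C)
    (h : (b + i) % C = (v + i) % C) : b = v := by
  have hb' : b % C = b := Int.emod_eq_of_lt hb.1 hb.2
  have hv' : v % C = v := Int.emod_eq_of_lt hv.1 hv.2
  calc b = b % C := hb'.symm
    _ = (b + i - i) % C := by ring_nf
    _ = ((b + i) % C - i % C) % C := by rw [Int.sub_emod]
    _ = ((v + i) % C - i % C) % C := by rw [h]
    _ = (v + i - i) % C := by rw [← Int.sub_emod]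
    _ = v % C := by ring_nf
    _ = v := hv'

theorem pv_shift_add (C i v : Int) (hC : 0 < C) (s : List Int)
    (hs : ∀ x ∈ s, 0 ≤ x ∧ x < C) (hv : 0 ≤ v ∧ v < C) :
    (PySem.Set.add s v).map (fun b => (b + i) % C)
      = PySem.Set.add (s.map (fun b => (b + i) % C)) ((v + i) % C) := by
  have hmem : ((v + i) % C ∈ s.map (fun b => (b + i) % C)) ↔ v ∈ s := by
    constructor
    · intro h
      rcases List.mem_map.mp h with ⟨b, hbmem, hbeq⟩
      have := pv_mod_inj hC (hs b hbmem) hv hbeq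
      exact this ▸ hbmem
    · intro h; exact List.mem_map.mpr ⟨v, h, rfl⟩
  simp only [PySem.Set.add]
  by_cases hvs : v ∈ s
  · rw [if_pos (by simpa using hvs), if_pos (by simpa using hmem.mpr hvs)]
  · rw [if_neg (by simpa using hvs), if_neg (by simpa using fun h => hvs (hmem.mp h))]
    simp

theorem pv_can_add {C v : Int} {s : List Int} (hs : ∀ x ∈ s, 0 ≤ x ∧ x < C)
    (hv : 0 ≤ v ∧ v < C) : ∀ x ∈ PySem.Set.add s v, 0 ≤ x ∧ x < C := by
  intro x hx
  rcases (PySem.Set.mem_add s v x).mp hx with h | h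
  · exact hs x h
  · exact h ▸ hv

theorem pv_mod_can {C a : Int} (hC : 0 < C) : 0 ≤ a % C ∧ a % C < C :=
  ⟨Int.emod_nonneg a (by omega), Int.emod_lt_of_pos a hC⟩

theorem pv_fold_shift (C i : Int) (hC : 0 < C) (l : List Int) :
    ∀ (s : List Int), (∀ x ∈ s, 0 ≤ x ∧ x < C) →
    l.foldl (fun t step => PySem.Set.add (PySem.Set.add t ((i - step) % C)) ((i + step) % C))
        (s.map (fun b => (b + i) % C))
      = (l.foldl (fun t step => PySem.Set.add (PySem.Set.add t ((-step) % C)) (step % C)) s).map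
          (fun b => (b + i) % C) := by
  induction l with
  | nil => intro s _; rfl
  | cons step rest ih =>
    intro s hs
    have h1 : 0 ≤ (-step) % C ∧ (-step) % C < C := pv_mod_can hC
    have h2 : 0 ≤ step % C ∧ step % C < C := pv_mod_can hC
    have hs1 : ∀ x ∈ PySem.Set.add s ((-step) % C), 0 ≤ x ∧ x < C := pv_can_add hs h1
    have hs2 : ∀ x ∈ PySem.Set.add (PySem.Set.add s ((-step) % C)) (step % C), 0 ≤ x ∧ x < C :=
      pv_can_add hs1 h2
    have e1 : ((-step) % C + i) % C = (i - step) % C := by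
      rw [Int.emod_add_emod]; ring_nf
    have e2 : (step % C + i) % C = (i + step) % C := by
      rw [Int.emod_add_emod]; ring_nf
    simp only [List.foldl_cons]
    rw [← ih (PySem.Set.add (PySem.Set.add s ((-step) % C)) (step % C)) hs2]
    rw [pv_shift_add C i _ hC _ hs1 h2, pv_shift_add C i _ hC s hs h1, e1, e2]

theorem pv_fold_can (C : Int) (hC : 0 < C) (l : List Int) :
    ∀ (s : List Int), (∀ x ∈ s, 0 ≤ x ∧ x < C) →
    ∀ x ∈ l.foldl (fun t step => PySem.Set.add (PySem.Set.add t ((-step) % C)) (step % C)) s,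
      0 ≤ x ∧ x < C := by
  induction l with
  | nil => intro s hs; exact hs
  | cons step rest ih =>
    intro s hs
    exact ih _ (pv_can_add (pv_can_add hs (pv_mod_can hC)) (pv_mod_can hC))

theorem pv_fold_nodup (C : Int) (l : List Int) :
    ∀ (s : List Int), s.Nodup →
    (l.foldl (fun t step => PySem.Set.add (PySem.Set.add t ((-step) % C)) (step % C)) s).Nodup := by
  induction l with
  | nil => intro s hs; exact hs
  | cons step rest ih =>
    intro s hs
    exact ih _ (PySem.Set.nodup_add _ _ (PySem.Set.nodup_add _ _ hs))

-- B's scan: folding the unit-rotation step over any list yields the shifted rows in order.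
theorem pv_scan (C : Int) (hC : 0 < C) (l : List Int) :
    ∀ (acc : List (List Int)) (r : List Int), (∀ x ∈ r, 0 ≤ x ∧ x < C) →
    (l.foldl
      (fun (st : List (List Int) × List Int) _ =>
        (st.1 ++ [PySem.Set.ofList st.2], st.2.map (fun x => (x + 1) % C)))
      (acc, r)).1
    = acc ++ (List.range l.length).map
        (fun (k : Nat) => PySem.Set.ofList (r.map (fun x => (x + (k : Int)) % C))) := by
  induction l with
  | nil => intro acc r _; simp
  | cons a rest ih =>
    intro acc r hr
    have hr' : ∀ x ∈ r.map (fun x => (x + 1) % C), 0 ≤ x ∧ x < C := by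
      intro x hx
      rcases List.mem_map.mp hx with ⟨b, _, rfl⟩
      exact pv_mod_can hC
    simp only [List.foldl_cons]
    rw [ih (acc ++ [PySem.Set.ofList r]) _ hr']
    rw [List.length_cons, List.range_succ_eq_map]
    simp only [List.map_cons, List.map_map, List.append_assoc, List.singleton_append]
    congr 1
    have h : List.map (fun x => (x + ((0 : Nat) : Int)) % C) r = r := by
      refine (List.map_congr_left fun x hx => ?_).trans (List.map_id' r)
      show (x + ((0 : Nat) : Int)) % C = x
      have := hr x hx
      simpa using Int.emod_eq_of_lt this.1 this.2
    rw [h]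
    congr 1
    apply List.map_congr_left
    intro k _
    simp only [Function.comp]
    congr 1
    apply List.map_congr_left
    intro x _
    simp only [Function.comp]
    rw [Int.emod_add_emod]
    congr 1
    push_cast
    ring

-- ===== VERDICT =====
theorem wiring_neighbors_circulant_spec : Claim_equal_wiring_neighbors_circulant := by
  intro C d _
  unfold Spec_wiring_neighbors_circulant wiring_neighbors_circulant wiring_neighbors_circulant_alt
  by_cases hC : C ≤ 0
  · rw [PySem.List.pyRange_one_eq_nil hC, if_pos hC]; rfl
  · have hCpos : 0 < C := by omega
    rw [if_neg hC]
    simp only [PySem.Int.mod_eq_emod_of_pos hCpos, List.foldl_cons, List.foldl_nil]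
    rw [pv_foldl_app, List.nil_append]
    simp only [show (PySem.Set.empty : PySem.Set Int) = ([] : List Int) from rfl]
    set steps := PySem.List.pyRange 1 (PySem.Int.floordiv d 2 + 1) 1 with hsteps
    set base := steps.foldl
      (fun s step => PySem.Set.add (PySem.Set.add s ((-step) % C)) (step % C))
      ([] : List Int) with hbase
    have hcan : ∀ x ∈ base, 0 ≤ x ∧ x < C :=
      pv_fold_can C hCpos steps [] (by intro x hx; simp at hx)
    have hnd : base.Nodup := pv_fold_nodup C steps [] List.nodup_nil
    rw [pv_scan C hCpos _ [] base hcan, List.nil_append]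
    simp only [PySem.List.pyRange_one, List.map_map, List.length_map, List.length_range,
      Int.sub_zero]
    apply List.map_congr_left
    intro k _
    simp only [Function.comp, zero_add]
    have := pv_fold_shift C (k : Int) hCpos steps [] (by intro x hx; simp at hx)
    simp only [List.map_nil] at this
    rw [this]
    rw [PySem.Set.ofList_eq_self_of_nodup _
      (hnd.map_on (fun x hx y hy h => pv_mod_inj hCpos (hcan x hx) (hcan y hy) h))]
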